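-- pv_equiv track=rewrite | github.com/vrthra/mimid | Cmimid/src/grammartools.py | remove_duplicate_rule_keys
-- ===== SOURCE A (Python) =====
-- def first_in_chain(token, chain):
--     while True:
--         if token in chain:
--             token = chain[token]
--         else:
--             break
--     return token
--
-- def replace_key_by_key(grammar, keys_to_replace):
--     new_grammar = {}
--     for key in grammar:
--         if key in keys_to_replace: continue
--         new_rules = []
--         for rule in grammar[key]:
--             new_rule = [first_in_chain(token, keys_to_replace) for token in rule]
--             new_rules.append(new_rule)
--         new_grammar[key] = new_rules
--     return new_grammar
--
-- def collect_duplicate_rule_keys(grammar):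
--     collect = {}
--     for k in grammar:
--         salt = str(sorted(grammar[k]))
--         if salt not in collect:
--             collect[salt] = (k, set())
--         else:
--             collect[salt][1].add(k)
--     return collect
--
-- def remove_duplicate_rule_keys(grammar):
--     g = grammar
--     while True:
--         collect = collect_duplicate_rule_keys(g)
--         keys_to_replace = {}
--         for salt in collect:
--             k, st = collect[salt]
--             for s in st:
--                 keys_to_replace[s] = k
--         if not keys_to_replace:
--             break
--         g = replace_key_by_key(g, keys_to_replace)
--     return g
-- ===== SOURCE B (Python) =====
-- def remove_duplicate_rule_keys(grammar):
--     # Fixpoint over a replacement map (dead key -> canonical live key) instead of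
--     # rebuilding the grammar each pass; the grammar is rewritten only once at the end.
--     repl = {}
--     while True:
--         seen = {}
--         merged = {}
--         for k in grammar:
--             if k in repl:
--                 continue
--             salt = str(sorted([[repl.get(t, t) for t in r] for r in grammar[k]]))
--             if salt in seen:
--                 merged[k] = seen[salt]
--             else:
--                 seen[salt] = k
--         if not merged:
--             break
--         repl = {d: merged.get(r, r) for d, r in repl.items()}
--         repl.update(merged)
--     return {k: [[repl.get(t, t) for t in r] for r in grammar[k]]
--             for k in grammar if k not in repl}
-- ===== Notes on version B (the rewrite author's own statement) =====
-- stated objective: alternative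
-- what changed: Instead of rebuilding the whole grammar on every pass, B maintains a replacement map (dead key -> canonical live key) to a fixpoint, resolving tokens through the map when salting each pass, and rewrites the grammar only once at the end.
import Mathlib
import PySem

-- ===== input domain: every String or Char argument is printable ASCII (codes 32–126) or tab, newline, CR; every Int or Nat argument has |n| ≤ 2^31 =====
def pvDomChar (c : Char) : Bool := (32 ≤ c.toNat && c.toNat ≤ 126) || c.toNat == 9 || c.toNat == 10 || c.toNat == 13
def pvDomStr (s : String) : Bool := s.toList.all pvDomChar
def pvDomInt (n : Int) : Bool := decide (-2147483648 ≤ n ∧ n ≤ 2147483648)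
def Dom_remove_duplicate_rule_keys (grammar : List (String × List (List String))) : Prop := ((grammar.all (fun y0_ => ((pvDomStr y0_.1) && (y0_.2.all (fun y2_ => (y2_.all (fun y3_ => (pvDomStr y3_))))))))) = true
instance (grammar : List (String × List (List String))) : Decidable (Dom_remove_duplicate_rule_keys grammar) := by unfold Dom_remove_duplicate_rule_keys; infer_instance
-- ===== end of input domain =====

-- B replaces A's per-pass grammar rewriting by a replacement map maintained to a
-- fixpoint, rewriting the grammar only once at the end (alternative decomposition).

-- ===== PORT A =====

-- str(repr) of a Python str: hand-ported; exact for strings whose characters are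
-- printable ASCII or tab/newline/CR (the Dom domain).
def pyReprStr (s : String) : String :=
  let cs := s.toList
  let q : Char := if cs.contains '\'' && !cs.contains '"' then '"' else '\''
  String.ofList (q :: (cs.flatMap (fun c =>
    if c = '\\' then ['\\', '\\']
    else if c = q then ['\\', q]
    else if c = '\t' then ['\\', 't']
    else if c = '\n' then ['\\', 'n']
    else if c = '\r' then ['\\', 'r']
    else [c])) ++ [q])

-- str() of a Python list[list[str]] (hand-ported: '[' ++ ', '.join ++ ']')
def pyReprLL (xss : List (List String)) : String :=
  "[" ++ String.intercalate ", "
    (xss.map (fun xs => "[" ++ String.intercalate ", " (xs.map pyReprStr) ++ "]")) ++ "]"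

-- str(sorted(rules)) — shared by both ports (both Pythons call str(sorted(...)))
def pvSalt (rules : List (List String)) : String :=
  pyReprLL (PySem.List.sorted rules (fun x => x) false)

-- while-loop of first_in_chain, made total with fuel (chain.size + 1 suffices:
-- inside A every chain has depth ≤ 1)
def pvFic (chain : PySem.Dict String String) : Nat → String → String
  | 0, token => token
  | f + 1, token =>
    match chain.get? token with
    | some t => pvFic chain f t
    | none => token

def first_in_chain (token : String) (chain : PySem.Dict String String) : String :=
  pvFic chain (chain.size + 1) token

def replace_key_by_key (g : PySem.Dict String (List (List String)))
    (ktr : PySem.Dict String String) : PySem.Dict String (List (List String)) :=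
  g.items.foldl (fun ng kr =>
    if ktr.contains kr.1 then ng
    else ng.insert kr.1 (kr.2.map (fun rule => rule.map (fun tok => first_in_chain tok ktr))))
    PySem.Dict.empty

-- 'salt not in collect' is ported as the match on collect.get? salt
def collect_duplicate_rule_keys (g : PySem.Dict String (List (List String))) :
    PySem.Dict String (String × PySem.Set String) :=
  g.items.foldl (fun c kr =>
    let salt := pvSalt kr.2
    match c.get? salt with
    | none => c.insert salt (kr.1, PySem.Set.empty)
    | some pr => c.insert salt (pr.1, PySem.Set.add pr.2 kr.1))
    PySem.Dict.empty

-- the 'while True' of A, with fuel (g.size + 1 passes always reach the fixpoint: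
-- every continuing pass removes at least one key)
def pvALoop (g : PySem.Dict String (List (List String))) :
    Nat → PySem.Dict String (List (List String))
  | 0 => g
  | f + 1 =>
    let collect := collect_duplicate_rule_keys g
    let ktr := collect.items.foldl (fun d pr => pr.2.2.foldl (fun d s => d.insert s pr.2.1) d)
      PySem.Dict.empty
    if ktr.size = 0 then g else pvALoop (replace_key_by_key g ktr) f

def remove_duplicate_rule_keys (grammar : List (String × List (List String))) :
    List (String × List (List String)) :=
  let g := PySem.Dict.ofList grammar
  (pvALoop g (g.size + 1)).items

-- ===== PORT B =====

-- repl.get(t, t)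
def pvResolve (repl : PySem.Dict String String) (t : String) : String := repl.getD t t

-- one pass of B: returns (seen, merged); 'salt in seen' ported as the match on seen.get?
def pvBPass (gitems : List (String × List (List String))) (repl : PySem.Dict String String) :
    PySem.Dict String String × PySem.Dict String String :=
  gitems.foldl (fun sm kr =>
    if repl.contains kr.1 then sm
    else
      let salt := pvSalt (kr.2.map (fun r => r.map (pvResolve repl)))
      match sm.1.get? salt with
      | some k0 => (sm.1, sm.2.insert kr.1 k0)
      | none => (sm.1.insert salt kr.1, sm.2))
    (PySem.Dict.empty, PySem.Dict.empty)

-- the 'while True' of B, with the same fuel bound as A's loop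
def pvBLoop (gitems : List (String × List (List String))) (repl : PySem.Dict String String) :
    Nat → PySem.Dict String String
  | 0 => repl
  | f + 1 =>
    let merged := (pvBPass gitems repl).2
    if merged.size = 0 then repl
    else pvBLoop gitems
      (merged.items.foldl (fun d p => d.insert p.1 p.2)
        (PySem.Dict.ofList (repl.items.map (fun p => (p.1, merged.getD p.2 p.2))))) f

def remove_duplicate_rule_keys_alt (grammar : List (String × List (List String))) :
    List (String × List (List String)) :=
  let gitems := (PySem.Dict.ofList grammar).items
  let repl := pvBLoop gitems PySem.Dict.empty (gitems.length + 1)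
  gitems.foldl (fun out kr =>
    if repl.contains kr.1 then out
    else out ++ [(kr.1, kr.2.map (fun r => r.map (pvResolve repl)))]) []

-- ===== PRECONDITION & SPEC =====
def Spec_remove_duplicate_rule_keys (grammar : List (String × List (List String))) (out : List (String × List (List String))) : Prop := out = remove_duplicate_rule_keys_alt grammar
instance (grammar : List (String × List (List String))) (out : List (String × List (List String))) : Decidable (Spec_remove_duplicate_rule_keys grammar out) := by unfold Spec_remove_duplicate_rule_keys; infer_instance

-- ===== CLAIM (what is proved, stated in full; the proofs are below) =====
def Claim_equal_remove_duplicate_rule_keys : Prop := ∀ (grammar : List (String × List (List String))), Dom_remove_duplicate_rule_keys grammar → Spec_remove_duplicate_rule_keys grammar (remove_duplicate_rule_keys grammar)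

-- ===== LEMMAS AND PROOFS =====

-- proof-side abbreviations
def resolveMap (repl : PySem.Dict String String) (rules : List (List String)) :
    List (List String) :=
  rules.map (fun r => r.map (pvResolve repl))

def buildItems (gitems : List (String × List (List String)))
    (repl : PySem.Dict String String) : List (String × List (List String)) :=
  (gitems.filter (fun kr => !repl.contains kr.1)).map (fun kr => (kr.1, resolveMap repl kr.2))

def buildG (gitems : List (String × List (List String)))
    (repl : PySem.Dict String String) : PySem.Dict String (List (List String)) :=
  ⟨buildItems gitems repl⟩

-- the abstract grouping steps (the passes of A and B seen on (key, salt) pairs)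
def cstep (c : PySem.Dict String (String × PySem.Set String)) (p : String × String) :
    PySem.Dict String (String × PySem.Set String) :=
  match c.get? p.2 with
  | none => c.insert p.2 (p.1, PySem.Set.empty)
  | some pr => c.insert p.2 (pr.1, PySem.Set.add pr.2 p.1)

def bstep (sm : PySem.Dict String String × PySem.Dict String String) (p : String × String) :
    PySem.Dict String String × PySem.Dict String String :=
  match sm.1.get? p.2 with
  | some k0 => (sm.1, sm.2.insert p.1 k0)
  | none => (sm.1.insert p.2 p.1, sm.2)

def flat1 (d : PySem.Dict String String) (pr : String × String × PySem.Set String) :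
    PySem.Dict String String :=
  pr.2.2.foldl (fun d s => d.insert s pr.2.1) d

def ktrOf (c : PySem.Dict String (String × PySem.Set String)) : PySem.Dict String String :=
  c.items.foldl flat1 PySem.Dict.empty

def GoodRepl (repl : PySem.Dict String String) : Prop :=
  repl.keys.Nodup ∧ ∀ p ∈ repl.items, repl.contains p.2 = false

-- invariant tying A's collect/ktr state to B's (seen, merged) state over processed keys P
structure GInv (c : PySem.Dict String (String × PySem.Set String))
    (s m : PySem.Dict String String) (P : List String) : Prop where
  rep : ∀ σ, (c.get? σ).map Prod.fst = s.get? σ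
  ktr : ∀ x, (ktrOf c).get? x = m.get? x
  cin : ∀ σ pr, c.get? σ = some pr → pr.1 ∈ P ∧ ∀ y ∈ pr.2, y ∈ P
  cnodup : c.keys.Nodup
  mrep : ∀ q ∈ m.items, ∃ σ, s.get? σ = some q.2
  srep : ∀ σ k, s.get? σ = some k → m.contains k = false ∧ k ∈ P
  mkeys : ∀ k ∈ m.keys, k ∈ P
  mnodup : m.keys.Nodup

lemma inner_get? (st : List String) (k0 : String) (d : PySem.Dict String String) (x : String) :
    (st.foldl (fun d s => d.insert s k0) d).get? x
      = if x ∈ st then some k0 else d.get? x := by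
  induction st generalizing d with
  | nil => simp
  | cons s t ih =>
    simp only [List.foldl_cons, ih, List.mem_cons]
    by_cases hx : x ∈ t
    · simp [hx]
    · by_cases hxs : x = s
      · subst hxs; simp [hx, PySem.Dict.get?_insert_self]
      · simp [hx, hxs, PySem.Dict.get?_insert]

lemma flat_ext (gs : List (String × String × PySem.Set String))
    (d₁ d₂ : PySem.Dict String String) (h : ∀ x, d₁.get? x = d₂.get? x) :
    ∀ x, (gs.foldl flat1 d₁).get? x = (gs.foldl flat1 d₂).get? x := by
  induction gs generalizing d₁ d₂ with
  | nil => exact h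
  | cons g t ih =>
    simp only [List.foldl_cons]
    exact ih _ _ (fun x => by simp [flat1, inner_get?, h x])

lemma flat_comm (gs : List (String × String × PySem.Set String))
    (d : PySem.Dict String String) (k kv : String) (h : ∀ g ∈ gs, k ∉ g.2.2) :
    ∀ x, (gs.foldl flat1 (d.insert k kv)).get? x = ((gs.foldl flat1 d).insert k kv).get? x := by
  induction gs generalizing d with
  | nil => intro x; rfl
  | cons g t ih =>
    intro x
    simp only [List.foldl_cons]
    have h1 : ∀ y, (flat1 (d.insert k kv) g).get? y = ((flat1 d g).insert k kv).get? y := by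
      intro y
      simp only [flat1, inner_get?, PySem.Dict.get?_insert]
      by_cases hy : y ∈ g.2.2
      · have : y ≠ k := fun he => h g (List.mem_cons_self ..) (he ▸ hy)
        simp [hy, this]
      · simp [hy]
    rw [flat_ext _ _ _ h1]
    exact ih _ (fun g hg => h g (List.mem_cons_of_mem _ hg)) x

lemma size_zero_iff_get? (d : PySem.Dict String String) :
    d.size = 0 ↔ ∀ x, d.get? x = none := by
  constructor
  · intro h x
    have h0 : d.items = [] := List.length_eq_zero_iff.mp h
    simp [PySem.Dict.get?, h0]
  · intro h
    cases hd : d.items with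
    | nil => simp [PySem.Dict.size, hd]
    | cons p t =>
      have hp := h p.1
      simp [PySem.Dict.get?, hd] at hp

-- inserting a fresh element into the set of one existing group shifts ktrOf by one insert
lemma ktr_update (c : PySem.Dict String (String × PySem.Set String)) (σ k0 k : String)
    (st : PySem.Set String) (hc : c.get? σ = some (k0, st)) (hnd : c.keys.Nodup)
    (hfresh : ∀ g ∈ c.items, k ∉ g.2.2) :
    ∀ x, (ktrOf (c.insert σ (k0, PySem.Set.add st k))).get? x
      = ((ktrOf c).insert k k0).get? x := by
  have hmem : (σ, (k0, st)) ∈ c.items := PySem.Dict.mem_items_of_get?_eq_some c hc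
  have hkst : k ∉ st := hfresh _ hmem
  have hadd : PySem.Set.add st k = st ++ [k] := by
    simp [PySem.Set.add, PySem.Set.contains_eq_listContains]
    intro hk; exact absurd hk hkst
  have hcont : c.contains σ = true := by
    rw [PySem.Dict.contains_eq_isSome_get?, hc]; rfl
  -- decompose the items at the σ entry
  have hfind : c.items.find? (fun p => p.1 == σ) = some (σ, (k0, st)) := by
    have := hc
    simp only [PySem.Dict.get?] at this
    cases hf : c.items.find? (fun p => p.1 == σ) with
    | none => rw [hf] at this; simp at this
    | some q =>
      rw [hf] at this
      have hq1 : q.1 = σ := by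
        have := List.find?_some hf; simpa using this
      have hq2 : q.2 = (k0, st) := by simpa using this
      exact congrArg some (Prod.ext hq1 hq2)
  obtain ⟨hpq, pre, post, hsplit, hpre⟩ := List.find?_eq_some_iff_append.mp hfind
  have hnd' : ((pre ++ (σ, (k0, st)) :: post).map Prod.fst).Nodup := by
    have hk : c.keys = (pre ++ (σ, (k0, st)) :: post).map Prod.fst := by
      simp [PySem.Dict.keys, hsplit]
    rw [← hk]; exact hnd
  have hσpost : ∀ a ∈ post, a.1 ≠ σ := by
    simp only [List.map_append, List.map_cons, List.nodup_append] at hnd'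
    intro a ha he
    exact (List.nodup_cons.mp hnd'.2.1).1 (he ▸ List.mem_map_of_mem ha)
  have hitems' : (c.insert σ (k0, PySem.Set.add st k)).items
      = pre ++ (σ, (k0, PySem.Set.add st k)) :: post := by
    rw [PySem.Dict.items_insert_of_contains c _ hcont, hsplit]
    have h1 : List.map (fun p => if (p.1 == σ) = true then (σ, (k0, PySem.Set.add st k)) else p) pre
        = List.map id pre := by
      apply List.map_congr_left
      intro a ha
      have : (a.1 == σ) = false := by
        have := hpre a ha; simpa using this
      simp [this]
    have h2 : List.map (fun p => if (p.1 == σ) = true then (σ, (k0, PySem.Set.add st k)) else p) post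
        = List.map id post := by
      apply List.map_congr_left
      intro a ha
      have : (a.1 == σ) = false := by simp [hσpost a ha]
      simp [this]
    rw [List.map_append, List.map_cons, h1, h2, List.map_id, List.map_id]
    simp
  intro x
  have hkpre : ∀ g ∈ pre, k ∉ g.2.2 := fun g hg =>
    hfresh g (by rw [hsplit]; exact List.mem_append_left _ hg)
  have hkpost : ∀ g ∈ post, k ∉ g.2.2 := fun g hg =>
    hfresh g (by rw [hsplit]; exact List.mem_append_right _ (List.mem_cons_of_mem _ hg))
  have hmid : flat1 (pre.foldl flat1 PySem.Dict.empty) (σ, (k0, PySem.Set.add st k))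
      = (flat1 (pre.foldl flat1 PySem.Dict.empty) (σ, (k0, st))).insert k k0 := by
    simp [flat1, hadd, List.foldl_append]
  unfold ktrOf
  rw [hitems', hsplit]
  simp only [List.foldl_append, List.foldl_cons, hmid]
  rw [flat_comm post _ k k0 hkpost x]
lemma ginv_step (c : PySem.Dict String (String × PySem.Set String))
    (s m : PySem.Dict String String) (P : List String) (k σ : String)
    (h : GInv c s m P) (hk : k ∉ P) :
    GInv (cstep c (k, σ)) (bstep (s, m) (k, σ)).1 (bstep (s, m) (k, σ)).2 (P ++ [k]) := by
  have hmk : m.contains k = false := by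
    rw [← Bool.not_eq_true]
    intro hmc
    exact hk (h.mkeys k ((PySem.Dict.contains_iff_mem_keys m k).mp hmc))
  cases hc : c.get? σ with
  | none =>
    have hs : s.get? σ = none := by have := h.rep σ; rw [hc] at this; simpa using this.symm
    have hccont : c.contains σ = false := (PySem.Dict.get?_eq_none_iff_contains c σ).mp hc
    simp only [cstep, bstep, hc, hs]
    constructor
    · intro τ
      rw [PySem.Dict.get?_insert, PySem.Dict.get?_insert]
      by_cases hτ : τ = σ
      · simp [hτ]
      · simp only [if_neg hτ]; exact h.rep τ
    · intro x
      unfold ktrOf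
      rw [PySem.Dict.items_insert_of_not_contains c _ hccont, List.foldl_append]
      simpa [flat1, PySem.Set.empty] using h.ktr x
    · intro τ pr hpr
      rw [PySem.Dict.get?_insert] at hpr
      by_cases hτ : τ = σ
      · rw [if_pos hτ] at hpr
        cases hpr
        exact ⟨by simp, by simp [PySem.Set.empty]⟩
      · rw [if_neg hτ] at hpr
        obtain ⟨h1, h2⟩ := h.cin τ pr hpr
        exact ⟨List.mem_append_left _ h1, fun y hy => List.mem_append_left _ (h2 y hy)⟩
    · rw [PySem.Dict.keys_insert_of_not_contains c _ hccont]
      refine List.Nodup.append h.cnodup (List.nodup_singleton σ) ?_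
      intro a ha hb
      simp at hb
      subst hb
      exact absurd ((PySem.Dict.contains_iff_mem_keys c _).mpr ha) (by simp [hccont])
    · intro q hq
      obtain ⟨τ, hτ⟩ := h.mrep q hq
      refine ⟨τ, ?_⟩
      rw [PySem.Dict.get?_insert]
      have hτσ : τ ≠ σ := fun he => by rw [he, hs] at hτ; cases hτ
      rw [if_neg hτσ]; exact hτ
    · intro τ k' hτ
      rw [PySem.Dict.get?_insert] at hτ
      by_cases hτσ : τ = σ
      · rw [if_pos hτσ] at hτ
        cases hτ
        exact ⟨hmk, by simp⟩
      · rw [if_neg hτσ] at hτ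
        obtain ⟨h1, h2⟩ := h.srep τ k' hτ
        exact ⟨h1, List.mem_append_left _ h2⟩
    · exact fun k' hk' => List.mem_append_left _ (h.mkeys k' hk')
    · exact h.mnodup
  | some pr =>
    obtain ⟨k0, st⟩ := pr
    have hs : s.get? σ = some k0 := by have := h.rep σ; rw [hc] at this; simpa using this.symm
    have hfresh : ∀ g ∈ c.items, k ∉ g.2.2 := by
      intro g hg hkg
      obtain ⟨g1, g2⟩ := g
      have hget : c.get? g1 = some g2 := PySem.Dict.get?_of_mem_items c hg h.cnodup
      exact hk ((h.cin g1 g2 hget).2 k hkg)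
    have hktru := ktr_update c σ k0 k st hc h.cnodup hfresh
    simp only [cstep, bstep, hc, hs]
    constructor
    · intro τ
      rw [PySem.Dict.get?_insert]
      by_cases hτ : τ = σ
      · simp [hτ, hs]
      · simp only [if_neg hτ]; exact h.rep τ
    · intro x
      rw [hktru x, PySem.Dict.get?_insert, PySem.Dict.get?_insert]
      by_cases hx : x = k
      · simp [hx]
      · simp only [if_neg hx]; exact h.ktr x
    · intro τ pr' hpr
      rw [PySem.Dict.get?_insert] at hpr
      by_cases hτ : τ = σ
      · rw [if_pos hτ] at hpr
        cases hpr
        obtain ⟨h1, h2⟩ := h.cin σ (k0, st) hc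
        refine ⟨List.mem_append_left _ h1, fun y hy => ?_⟩
        rcases (PySem.Set.mem_add st k y).mp hy with hy' | hy'
        · exact List.mem_append_left _ (h2 y hy')
        · subst hy'; simp
      · rw [if_neg hτ] at hpr
        obtain ⟨h1, h2⟩ := h.cin τ pr' hpr
        exact ⟨List.mem_append_left _ h1, fun y hy => List.mem_append_left _ (h2 y hy)⟩
    · rw [PySem.Dict.keys_insert_of_contains c _
        (by rw [PySem.Dict.contains_eq_isSome_get?, hc]; rfl)]
      exact h.cnodup
    · intro q hq
      rcases (PySem.Dict.mem_items_insert m k k0 q).mp hq with hq' | ⟨hq', _⟩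
      · exact ⟨σ, by rw [hq']; exact hs⟩
      · exact h.mrep q hq'
    · intro τ k' hτ
      obtain ⟨h1, h2⟩ := h.srep τ k' hτ
      have hk'k : k' ≠ k := fun he => hk (he ▸ h2)
      rw [PySem.Dict.contains_insert]
      refine ⟨by simp [hk'k, h1], List.mem_append_left _ h2⟩
    · intro k' hk'
      rcases (PySem.Dict.mem_keys_insert m k k' k0).mp hk' with hk'' | hk''
      · subst hk''; simp
      · exact List.mem_append_left _ (h.mkeys k' hk'')
    · rw [PySem.Dict.keys_insert_of_not_contains m _ hmk]
      refine List.Nodup.append h.mnodup (List.nodup_singleton k) ?_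
      intro a ha hb
      simp at hb
      subst hb
      exact hk (h.mkeys a ha)

lemma group_go : ∀ (L : List (String × String)) c s m P, GInv c s m P →
    (∀ p ∈ L, p.1 ∉ P) → (L.map Prod.fst).Nodup →
    GInv (L.foldl cstep c) (L.foldl bstep (s, m)).1 (L.foldl bstep (s, m)).2
      (P ++ L.map Prod.fst) := by
  intro L
  induction L with
  | nil => intro c s m P h _ _; simpa using h
  | cons p L ih =>
    intro c s m P h hP hnd
    obtain ⟨k, σ⟩ := p
    simp only [List.map_cons, List.nodup_cons] at hnd
    have hkP : k ∉ P := hP (k, σ) (List.mem_cons_self ..)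
    have hstep := ginv_step c s m P k σ h hkP
    have hrest := ih (cstep c (k, σ)) (bstep (s, m) (k, σ)).1 (bstep (s, m) (k, σ)).2 (P ++ [k])
      hstep
      (fun q hq hmem => by
        rcases List.mem_append.mp hmem with h1 | h2
        · exact hP q (List.mem_cons_of_mem _ hq) h1
        · exact hnd.1 ((List.mem_singleton.mp h2) ▸ List.mem_map_of_mem hq)) hnd.2
    simpa [List.append_assoc] using hrest


lemma ginv_init : GInv PySem.Dict.empty PySem.Dict.empty PySem.Dict.empty [] := by
  constructor
  · intro σ; simp [PySem.Dict.get?_empty]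
  · intro x; simp [ktrOf, PySem.Dict.empty]
  · intro σ pr hpr; rw [PySem.Dict.get?_empty] at hpr; cases hpr
  · simp [PySem.Dict.empty, PySem.Dict.keys]
  · intro q hq; simp [PySem.Dict.empty] at hq
  · intro τ k' h; rw [PySem.Dict.get?_empty] at h; cases h
  · intro k hk; simp [PySem.Dict.empty, PySem.Dict.keys] at hk
  · simp [PySem.Dict.empty, PySem.Dict.keys]

def liveL (gitems : List (String × List (List String))) (repl : PySem.Dict String String) :
    List (String × List (List String)) :=
  gitems.filter (fun kr => !repl.contains kr.1)

def saltL (gitems : List (String × List (List String))) (repl : PySem.Dict String String) :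
    List (String × String) :=
  (liveL gitems repl).map (fun kr => (kr.1, pvSalt (resolveMap repl kr.2)))

def updRepl (repl m : PySem.Dict String String) : PySem.Dict String String :=
  m.items.foldl (fun d p => d.insert p.1 p.2)
    (PySem.Dict.ofList (repl.items.map (fun p => (p.1, m.getD p.2 p.2))))

lemma collect_build_eq (gitems : List (String × List (List String)))
    (repl : PySem.Dict String String) :
    collect_duplicate_rule_keys (buildG gitems repl)
      = (saltL gitems repl).foldl cstep PySem.Dict.empty := by
  unfold collect_duplicate_rule_keys saltL
  show (buildItems gitems repl).foldl _ _ = _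
  unfold buildItems liveL
  rw [List.foldl_map, List.foldl_map]
  rfl

lemma bpass_eq (gitems : List (String × List (List String)))
    (repl : PySem.Dict String String) :
    pvBPass gitems repl = (saltL gitems repl).foldl bstep (PySem.Dict.empty, PySem.Dict.empty) := by
  unfold pvBPass saltL liveL
  rw [List.foldl_map, List.foldl_filter]
  congr 1
  funext sm kr
  cases h : repl.contains kr.1 <;> simp [bstep, resolveMap]

lemma nodup_saltL_keys (gitems : List (String × List (List String)))
    (repl : PySem.Dict String String) (hg : (gitems.map Prod.fst).Nodup) :
    ((saltL gitems repl).map Prod.fst).Nodup := by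
  unfold saltL liveL
  rw [List.map_map]
  have : (List.map (Prod.fst ∘ fun kr => (kr.1, pvSalt (resolveMap repl kr.2)))
      (gitems.filter (fun kr => !repl.contains kr.1)))
      = (gitems.filter (fun kr => !repl.contains kr.1)).map Prod.fst := rfl
  rw [this]
  exact (hg.sublist (List.Sublist.map _ (List.filter_sublist)))

-- the grouping invariant at the end of one pass
lemma pass_ginv (gitems : List (String × List (List String)))
    (repl : PySem.Dict String String) (hg : (gitems.map Prod.fst).Nodup) :
    GInv ((saltL gitems repl).foldl cstep PySem.Dict.empty)
      ((saltL gitems repl).foldl bstep (PySem.Dict.empty, PySem.Dict.empty)).1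
      ((saltL gitems repl).foldl bstep (PySem.Dict.empty, PySem.Dict.empty)).2
      ((saltL gitems repl).map Prod.fst) := by
  have := group_go (saltL gitems repl) PySem.Dict.empty PySem.Dict.empty PySem.Dict.empty []
    ginv_init (by simp) (nodup_saltL_keys gitems repl hg)
  simpa using this

lemma mem_saltL_keys (gitems : List (String × List (List String)))
    (repl : PySem.Dict String String) (x : String) :
    x ∈ (saltL gitems repl).map Prod.fst ↔
      (∃ kr ∈ gitems, kr.1 = x) ∧ repl.contains x = false := by
  unfold saltL liveL
  rw [List.map_map]
  constructor
  · intro hx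
    obtain ⟨kr, hkr, hfst⟩ := List.mem_map.mp hx
    have hmem := List.mem_filter.mp hkr
    refine ⟨⟨kr, hmem.1, by simpa using hfst⟩, ?_⟩
    have := hmem.2
    simp only [Bool.not_eq_true'] at this
    rw [show x = kr.1 from (by simpa using hfst.symm)]
    exact this
  · rintro ⟨⟨kr, hkr, hfst⟩, hcon⟩
    exact List.mem_map.mpr ⟨kr, List.mem_filter.mpr ⟨hkr, by simp [hfst, hcon]⟩, by simpa using hfst⟩

-- first_in_chain is a single lookup when no value of the chain is a key of it
lemma fic_eq (ktr m : PySem.Dict String String) (he : ∀ x, ktr.get? x = m.get? x)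
    (hmv : ∀ q ∈ m.items, m.contains q.2 = false) (tok : String) :
    first_in_chain tok ktr = m.getD tok tok := by
  unfold first_in_chain
  rw [PySem.Dict.getD_eq_get?_getD, ← he tok]
  cases hget : ktr.get? tok with
  | none => simp [pvFic, hget]
  | some v =>
    have hmtok : m.get? tok = some v := by rw [← he]; exact hget
    have hmem : (tok, v) ∈ m.items := PySem.Dict.mem_items_of_get?_eq_some m hmtok
    have hv : ktr.get? v = none := by
      rw [he]
      exact (PySem.Dict.get?_eq_none_iff_contains m v).mpr (hmv (tok, v) hmem)
    have hsz : ∃ t, ktr.size = t + 1 := by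
      cases hit : ktr.items with
      | nil =>
        exfalso
        simp [PySem.Dict.get?, hit] at hget
      | cons a l => exact ⟨l.length, by simp [PySem.Dict.size, hit]⟩
    obtain ⟨t, ht⟩ := hsz
    rw [ht]
    simp [pvFic, hget, hv]

-- canonical items of the updated replacement map
lemma updRepl_items (repl m : PySem.Dict String String) (hrk : repl.keys.Nodup)
    (hdisj : ∀ k ∈ m.keys, repl.contains k = false) (hmnd : m.keys.Nodup) :
    (updRepl repl m).items = repl.items.map (fun p => (p.1, m.getD p.2 p.2)) ++ m.items := by
  unfold updRepl PySem.Dict.ofList PySem.Dict.update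
  have hbase := PySem.Dict.items_foldl_insert_fresh
    (repl.items.map (fun p => (p.1, m.getD p.2 p.2))) Prod.fst Prod.snd PySem.Dict.empty
    (fun a _ => PySem.Dict.contains_empty a.1)
    (by
      rw [List.map_map]
      have : (List.map (Prod.fst ∘ fun p => (p.1, m.getD p.2 p.2)) repl.items)
          = repl.items.map Prod.fst := rfl
      rw [this]; exact hrk)
  have hbase' : (List.foldl (fun (acc : PySem.Dict String String) (p : String × String) => acc.insert p.1 p.2)
      PySem.Dict.empty (repl.items.map (fun p => (p.1, m.getD p.2 p.2)))).items
      = repl.items.map (fun p => (p.1, m.getD p.2 p.2)) := by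
    simpa using hbase
  have hbk : (List.foldl (fun (acc : PySem.Dict String String) (p : String × String) => acc.insert p.1 p.2)
      PySem.Dict.empty (repl.items.map (fun p => (p.1, m.getD p.2 p.2)))).keys
      = repl.keys := by
    unfold PySem.Dict.keys
    rw [hbase', List.map_map]
    rfl
  have hfresh : ∀ q ∈ m.items,
      (List.foldl (fun (acc : PySem.Dict String String) (p : String × String) => acc.insert p.1 p.2)
        PySem.Dict.empty (repl.items.map (fun p => (p.1, m.getD p.2 p.2)))).contains q.1
        = false := by
    intro q hq
    rw [← Bool.not_eq_true]
    intro hct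
    have hmemk := (PySem.Dict.contains_iff_mem_keys _ _).mp hct
    rw [hbk] at hmemk
    have hcr : repl.contains q.1 = true := (PySem.Dict.contains_iff_mem_keys _ _).mpr hmemk
    have hqk : q.1 ∈ m.keys := List.mem_map.mpr ⟨q, hq, rfl⟩
    rw [hdisj q.1 hqk] at hcr
    cases hcr
  have hmnd' : (m.items.map Prod.fst).Nodup := hmnd
  have h2 := PySem.Dict.items_foldl_insert_fresh m.items Prod.fst Prod.snd _ hfresh hmnd'
  rw [h2, hbase']
  simp

lemma updRepl_get? (repl m : PySem.Dict String String) (hrk : repl.keys.Nodup)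
    (hdisj : ∀ k ∈ m.keys, repl.contains k = false) (hmnd : m.keys.Nodup) (t : String) :
    (updRepl repl m).get? t
      = match repl.get? t with
        | some r => some (m.getD r r)
        | none => m.get? t := by
  have hit := updRepl_items repl m hrk hdisj hmnd
  show ((updRepl repl m).items.find? (fun p => p.1 == t)).map (fun x => x.2) = _
  rw [hit, List.find?_append, List.find?_map]
  have hpred : ((fun (p : String × String) => p.1 == t) ∘ (fun p => (p.1, m.getD p.2 p.2)))
      = (fun (p : String × String) => p.1 == t) := rfl
  rw [hpred]
  cases hr : repl.items.find? (fun p => p.1 == t) with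
  | none => simp [PySem.Dict.get?, hr]
  | some q => simp [PySem.Dict.get?, hr]

lemma updRepl_contains (repl m : PySem.Dict String String) (hrk : repl.keys.Nodup)
    (hdisj : ∀ k ∈ m.keys, repl.contains k = false) (hmnd : m.keys.Nodup) (x : String) :
    (updRepl repl m).contains x = (repl.contains x || m.contains x) := by
  rw [PySem.Dict.contains_eq_isSome_get?, updRepl_get? repl m hrk hdisj hmnd,
    PySem.Dict.contains_eq_isSome_get?, PySem.Dict.contains_eq_isSome_get?]
  cases repl.get? x with
  | some r => simp
  | none => simp

lemma resolve_upd (repl m : PySem.Dict String String) (hrk : repl.keys.Nodup)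
    (hdisj : ∀ k ∈ m.keys, repl.contains k = false) (hmnd : m.keys.Nodup) (t : String) :
    pvResolve (updRepl repl m) t = m.getD (pvResolve repl t) (pvResolve repl t) := by
  unfold pvResolve
  rw [PySem.Dict.getD_eq_get?_getD, updRepl_get? repl m hrk hdisj hmnd]
  cases hr : repl.get? t with
  | some r => simp [PySem.Dict.getD_eq_get?_getD, hr]
  | none => simp [PySem.Dict.getD_eq_get?_getD, hr]

lemma goodRepl_upd (repl m : PySem.Dict String String) (hrepl : GoodRepl repl)
    (hdisj : ∀ k ∈ m.keys, repl.contains k = false) (hmnd : m.keys.Nodup)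
    (hmv : ∀ q ∈ m.items, m.contains q.2 = false ∧ repl.contains q.2 = false) :
    GoodRepl (updRepl repl m) := by
  have hit := updRepl_items repl m hrepl.1 hdisj hmnd
  have hkeys : (updRepl repl m).keys = repl.keys ++ m.keys := by
    unfold PySem.Dict.keys
    rw [hit, List.map_append, List.map_map]
    rfl
  constructor
  · rw [hkeys]
    refine List.Nodup.append hrepl.1 hmnd ?_
    intro a ha hb
    have h1 := hdisj a hb
    have h2 := (PySem.Dict.contains_iff_mem_keys repl a).mpr ha
    rw [h1] at h2
    cases h2
  · intro p hp
    rw [hit] at hp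
    have hcu := fun x => updRepl_contains repl m hrepl.1 hdisj hmnd x
    rcases List.mem_append.mp hp with hp' | hp'
    · obtain ⟨q, hq, hqe⟩ := List.mem_map.mp hp'
      have hqr : repl.contains q.2 = false := hrepl.2 q hq
      rw [← hqe]
      cases hmr : m.get? q.2 with
      | some k0 =>
        have hk0 : (q.2, k0) ∈ m.items := PySem.Dict.mem_items_of_get?_eq_some m hmr
        obtain ⟨h1, h2⟩ := hmv (q.2, k0) hk0
        simp only [hcu]
        rw [PySem.Dict.getD_eq_get?_getD, hmr]
        simp [h1, h2]
      | none =>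
        have h1 : m.contains q.2 = false := (PySem.Dict.get?_eq_none_iff_contains m q.2).mp hmr
        simp only [hcu]
        rw [PySem.Dict.getD_eq_get?_getD, hmr]
        simp [h1, hqr]
    · obtain ⟨h1, h2⟩ := hmv p hp'
      rw [hcu p.2, h1, h2]
      rfl

lemma pass_summary (gitems : List (String × List (List String)))
    (repl : PySem.Dict String String) (hg : (gitems.map Prod.fst).Nodup) :
    (∀ x, (ktrOf (collect_duplicate_rule_keys (buildG gitems repl))).get? x
        = (pvBPass gitems repl).2.get? x)
    ∧ (pvBPass gitems repl).2.keys.Nodup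
    ∧ (∀ k ∈ (pvBPass gitems repl).2.keys, repl.contains k = false)
    ∧ (∀ q ∈ (pvBPass gitems repl).2.items,
        (pvBPass gitems repl).2.contains q.2 = false ∧ repl.contains q.2 = false) := by
  rw [collect_build_eq, bpass_eq]
  have hGI := pass_ginv gitems repl hg
  refine ⟨hGI.ktr, hGI.mnodup, ?_, ?_⟩
  · intro k hk
    exact ((mem_saltL_keys gitems repl k).mp (hGI.mkeys k hk)).2
  · intro q hq
    obtain ⟨σ, hσ⟩ := hGI.mrep q hq
    obtain ⟨h1, h2⟩ := hGI.srep σ q.2 hσ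
    exact ⟨h1, ((mem_saltL_keys gitems repl q.2).mp h2).2⟩

lemma replace_build (gitems : List (String × List (List String)))
    (repl : PySem.Dict String String) (hg : (gitems.map Prod.fst).Nodup)
    (hrepl : GoodRepl repl) :
    replace_key_by_key (buildG gitems repl)
        (ktrOf (collect_duplicate_rule_keys (buildG gitems repl)))
      = buildG gitems (updRepl repl (pvBPass gitems repl).2) := by
  obtain ⟨he, hmnd, hmk, hmv⟩ := pass_summary gitems repl hg
  set m := (pvBPass gitems repl).2 with hm
  set ktr := ktrOf (collect_duplicate_rule_keys (buildG gitems repl)) with hktr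
  have hmv' : ∀ q ∈ m.items, m.contains q.2 = false := fun q hq => (hmv q hq).1
  have hcm : ∀ x, ktr.contains x = m.contains x := by
    intro x
    rw [PySem.Dict.contains_eq_isSome_get?, PySem.Dict.contains_eq_isSome_get?, he x]
  -- the fold of A's replace is a filtered append of fresh keys
  have hflip : (fun (ng : PySem.Dict String (List (List String))) (kr : String × List (List String)) =>
        if ktr.contains kr.1 then ng
        else ng.insert kr.1 (kr.2.map (fun rule => rule.map (fun tok => first_in_chain tok ktr))))
      = (fun ng kr => if (!ktr.contains kr.1) = true
          then ng.insert kr.1 (kr.2.map (fun rule => rule.map (fun tok => first_in_chain tok ktr)))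
          else ng) := by
    funext ng kr
    cases h : ktr.contains kr.1 <;> simp
  have hkeysn : (((buildG gitems repl).items.filter
      (fun kr => !ktr.contains kr.1)).map Prod.fst).Nodup := by
    have h1 : ((buildG gitems repl).items.map Prod.fst).Nodup := by
      show ((buildItems gitems repl).map Prod.fst).Nodup
      unfold buildItems
      rw [List.map_map]
      exact hg.sublist (List.Sublist.map _ (List.filter_sublist))
    exact h1.sublist (List.Sublist.map _ (List.filter_sublist))
  have hfresh : ∀ a ∈ (buildG gitems repl).items.filter (fun kr => !ktr.contains kr.1),
      (PySem.Dict.empty : PySem.Dict String (List (List String))).contains a.1 = false :=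
    fun a _ => PySem.Dict.contains_empty a.1
  apply PySem.Dict.ext
  unfold replace_key_by_key
  rw [hflip, ← List.foldl_filter, PySem.Dict.items_foldl_insert_fresh _ Prod.fst _ _ hfresh hkeysn]
  rw [show (PySem.Dict.empty : PySem.Dict String (List (List String))).items = [] from rfl,
    List.nil_append]
  -- rewrite the left side as a single filter + map over gitems
  show ((buildItems gitems repl).filter (fun kr => !ktr.contains kr.1)).map
      (fun kr => (kr.1, kr.2.map (fun rule => rule.map (fun tok => first_in_chain tok ktr)))) = _
  unfold buildItems
  rw [List.filter_map, List.map_map, List.filter_filter]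
  have hpt : ∀ kr : String × List (List String),
      (((fun (p : String × List (List String)) => !ktr.contains p.1) ∘
          fun kr => (kr.1, resolveMap repl kr.2)) kr && !repl.contains kr.1)
        = !(updRepl repl m).contains kr.1 := by
    intro kr
    show ((!ktr.contains kr.1) && !repl.contains kr.1) = !(updRepl repl m).contains kr.1
    rw [updRepl_contains repl m hrepl.1 hmk hmnd, hcm]
    cases h1 : repl.contains kr.1 <;> cases h2 : m.contains kr.1 <;> simp
  rw [List.filter_congr (fun kr _ => hpt kr)]
  apply List.map_congr_left
  intro kr _
  have hval : ∀ t, first_in_chain (pvResolve repl t) ktr = pvResolve (updRepl repl m) t := by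
    intro t
    rw [fic_eq ktr m he hmv', resolve_upd repl m hrepl.1 hmk hmnd]
  show ((fun kr => (kr.1, kr.2.map (fun rule => rule.map (fun tok => first_in_chain tok ktr)))) ∘
      (fun kr => (kr.1, resolveMap repl kr.2))) kr = (kr.1, resolveMap (updRepl repl m) kr.2)
  simp only [Function.comp_apply, resolveMap, List.map_map]
  refine congrArg _ ?_
  apply List.map_congr_left
  intro r _
  simp only [Function.comp_apply, List.map_map]
  apply List.map_congr_left
  intro t _
  exact hval t

lemma loop_eq (gitems : List (String × List (List String)))
    (hg : (gitems.map Prod.fst).Nodup) :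
    ∀ n (repl : PySem.Dict String String), GoodRepl repl →
      pvALoop (buildG gitems repl) n = buildG gitems (pvBLoop gitems repl n) := by
  intro n
  induction n with
  | zero => intro repl _; rfl
  | succ f ih =>
    intro repl hrepl
    obtain ⟨he, hmnd, hmk, hmv⟩ := pass_summary gitems repl hg
    simp only [pvALoop, pvBLoop]
    rw [show List.foldl (fun d pr => List.foldl (fun d s => d.insert s pr.2.1) d pr.2.2)
        PySem.Dict.empty (collect_duplicate_rule_keys (buildG gitems repl)).items
      = ktrOf (collect_duplicate_rule_keys (buildG gitems repl)) from rfl]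
    rw [show List.foldl (fun d (p : String × String) => d.insert p.1 p.2)
        (PySem.Dict.ofList (List.map (fun p => (p.1, (pvBPass gitems repl).2.getD p.2 p.2)) repl.items))
        (pvBPass gitems repl).2.items
      = updRepl repl (pvBPass gitems repl).2 from rfl]
    by_cases hz : (pvBPass gitems repl).2.size = 0
    · have hz' : (ktrOf (collect_duplicate_rule_keys (buildG gitems repl))).size = 0 := by
        rw [size_zero_iff_get?]
        intro x
        rw [he x]
        exact (size_zero_iff_get? _).mp hz x
      rw [if_pos hz', if_pos hz]
    · have hz' : ¬ (ktrOf (collect_duplicate_rule_keys (buildG gitems repl))).size = 0 := by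
        intro h0
        exact hz ((size_zero_iff_get? _).mpr (fun x => by
          rw [← he x]; exact (size_zero_iff_get? _).mp h0 x))
      rw [if_neg hz', if_neg hz]
      have hrb := replace_build gitems repl hg hrepl
      rw [hrb]
      exact ih (updRepl repl (pvBPass gitems repl).2)
        (goodRepl_upd repl _ hrepl hmk hmnd hmv)

lemma out_fold (gitems : List (String × List (List String)))
    (repl : PySem.Dict String String) :
    gitems.foldl (fun out kr =>
        if repl.contains kr.1 then out
        else out ++ [(kr.1, kr.2.map (fun r => r.map (pvResolve repl)))]) []
      = buildItems gitems repl := by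
  have hflip : (fun (out : List (String × List (List String))) (kr : String × List (List String)) =>
        if repl.contains kr.1 then out
        else out ++ [(kr.1, kr.2.map (fun r => r.map (pvResolve repl)))])
      = (fun out kr => if (!repl.contains kr.1) = true
          then out ++ [(kr.1, kr.2.map (fun r => r.map (pvResolve repl)))] else out) := by
    funext out kr
    cases h : repl.contains kr.1 <;> simp
  rw [hflip, PySem.List.foldl_append_if]
  rfl

lemma build_empty (gitems : List (String × List (List String))) :
    buildG gitems PySem.Dict.empty = PySem.Dict.mk gitems := by
  apply PySem.Dict.ext
  show buildItems gitems PySem.Dict.empty = gitems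
  unfold buildItems
  have h2 : pvResolve (PySem.Dict.empty : PySem.Dict String String) = fun t => t := by
    funext t
    simp [pvResolve, PySem.Dict.getD_empty]
  simp [resolveMap, h2, PySem.Dict.contains_empty]

lemma goodRepl_empty : GoodRepl PySem.Dict.empty :=
  ⟨PySem.Dict.nodup_keys_empty, fun p hp => by simp [PySem.Dict.empty] at hp⟩

-- ===== VERDICT (by name: the statement is the Claim_ definition above) =====
theorem remove_duplicate_rule_keys_spec : Claim_equal_remove_duplicate_rule_keys := by
  intro grammar _
  unfold Spec_remove_duplicate_rule_keys remove_duplicate_rule_keys remove_duplicate_rule_keys_alt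
  have hg : ((PySem.Dict.ofList grammar).items.map Prod.fst).Nodup :=
    PySem.Dict.nodup_keys_ofList grammar
  have hle := loop_eq (PySem.Dict.ofList grammar).items hg
    ((PySem.Dict.ofList grammar).items.length + 1) PySem.Dict.empty goodRepl_empty
  rw [build_empty] at hle
  have hmk : PySem.Dict.mk (PySem.Dict.ofList grammar).items = PySem.Dict.ofList grammar := rfl
  rw [hmk] at hle
  show (pvALoop (PySem.Dict.ofList grammar) ((PySem.Dict.ofList grammar).size + 1)).items = _
  have hsz : (PySem.Dict.ofList grammar).size = (PySem.Dict.ofList grammar).items.length := rfl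
  rw [hsz, hle, out_fold]
  rfl
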